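-- pv_equiv track=rewrite | github.com/DReichLab/waldo | samples/management/commands/zhao_barcodes.py | barcode_length
-- ===== SOURCE A (Python) =====
-- def barcode_length(sequence):
-- 	if ':' in sequence:
-- 		parts = sequence.split(':')
-- 		lengths = [len(part) for part in parts]
-- 		for to_check in lengths[1:]:
-- 			if lengths[0] != to_check:
-- 				raise ValueError(f'barcode length problem in {sequence}')
-- 		return lengths[0]
-- 	else:
-- 		return len(sequence)
-- ===== SOURCE B (Python) =====
-- def barcode_length(sequence):
--     # No split: locate the first colon (index k = candidate part length), then
--     # check arithmetically that colons sit exactly at positions i % (k+1) == k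
--     # and that the total length is m*(k+1) + k for some m.
--     k = 0
--     while k < len(sequence) and sequence[k] != ':':
--         k += 1
--     ok = len(sequence) % (k + 1) == k
--     for i, ch in enumerate(sequence):
--         if (ch == ':') != (i % (k + 1) == k):
--             ok = False
--     if not ok:
--         raise ValueError(f'barcode length problem in {sequence}')
--     return k
-- ===== Notes on version B (the rewrite author's own statement) =====
-- stated objective: alternative
-- what changed: B builds no part list at all: it scans for the index k of the first colon, then validates the whole string arithmetically — a character must be a colon exactly when its position i satisfies i % (k+1) == k, and the total length modulo k+1 must equal k — returning k; A instead splits on the colon and compares every part's length to the first.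
import Mathlib
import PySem

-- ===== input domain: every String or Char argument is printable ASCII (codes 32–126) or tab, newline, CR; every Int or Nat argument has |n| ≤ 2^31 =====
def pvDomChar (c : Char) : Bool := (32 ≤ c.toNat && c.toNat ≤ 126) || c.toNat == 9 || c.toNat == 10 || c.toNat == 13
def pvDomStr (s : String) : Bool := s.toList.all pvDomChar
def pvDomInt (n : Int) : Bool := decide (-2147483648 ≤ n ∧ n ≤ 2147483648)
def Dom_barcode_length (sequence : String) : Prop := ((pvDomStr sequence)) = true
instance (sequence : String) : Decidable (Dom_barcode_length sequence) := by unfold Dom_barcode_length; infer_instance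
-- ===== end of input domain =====

-- B replaces split-and-compare by a scan with no part list at all: find the first
-- colon's index k, then check arithmetically that colons sit exactly at positions
-- congruent to k modulo k+1 and the total length is too (objective: alternative).

-- ===== PORT A =====
def barcode_length (sequence : String) : Int :=
  if PySem.Str.isIn ":" sequence then
    let parts := (PySem.Str.split? sequence ":").getD []
    let lengths := parts.map (fun part => PySem.Str.len part)
    if (PySem.List.slice lengths (some 1) none).all
        (fun to_check => decide (PySem.List.pyGetD lengths 0 0 = to_check)) then
      PySem.List.pyGetD lengths 0 0
    else 0  -- raise ValueError: excluded by Pre_barcode_length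
  else PySem.Str.len sequence

-- ===== PORT B =====
-- the while loop of Source B: index of the first colon (or the length if none)
def firstColonIdx : List Char → Nat
  | [] => 0
  | c :: rest => if c = ':' then 0 else firstColonIdx rest + 1

-- the `for i, ch in enumerate(sequence)` loop of Source B, carrying the index i
def checkPos (k : Nat) : Nat → List Char → Bool
  | _, [] => true
  | i, c :: rest => ((c == ':') == (i % (k + 1) == k)) && checkPos k (i + 1) rest

def barcode_length_alt (sequence : String) : Int :=
  let cs := sequence.toList
  let k := firstColonIdx cs
  let ok := (cs.length % (k + 1) == k) && checkPos k 0 cs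
  if ok then (k : Int) else 0  -- raise ValueError: excluded by Pre_barcode_length

-- ===== PRECONDITION & SPEC =====
-- Pre_ excludes exactly the inputs on which A raises ValueError: colon-separated parts of unequal length.
def Pre_barcode_length (sequence : String) : Prop :=
  ∀ x ∈ ((PySem.Str.split? sequence ":").getD []).map (fun part => PySem.Str.len part),
    x = (((PySem.Str.split? sequence ":").getD []).map (fun part => PySem.Str.len part)).headD 0
instance (sequence : String) : Decidable (Pre_barcode_length sequence) := by
  unfold Pre_barcode_length; infer_instance
def pvWitness_barcode_length : String := "AAT:GGC"

def Spec_barcode_length (sequence : String) (out : Int) : Prop := out = barcode_length_alt sequence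
instance (sequence : String) (out : Int) : Decidable (Spec_barcode_length sequence out) := by unfold Spec_barcode_length; infer_instance

-- ===== CLAIM (what is proved, stated in full; the proofs are below) =====
def Claim_equal_barcode_length : Prop := ∀ (sequence : String), Dom_barcode_length sequence → Pre_barcode_length sequence → Spec_barcode_length sequence (barcode_length sequence)

-- ===== LEMMAS AND PROOFS =====

-- reference structural recursion for splitting on a single ':'
def split1 : List Char → List (List Char)
  | [] => [[]]
  | c :: rest =>
    if c = ':' then [] :: split1 rest
    else match split1 rest with
      | [] => [[c]]
      | p :: ps => (c :: p) :: ps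

def join1 : List (List Char) → List Char
  | [] => []
  | [p] => p
  | p :: q :: qs => p ++ ':' :: join1 (q :: qs)

def mapHead (f : List Char → List Char) : List (List Char) → List (List Char)
  | [] => []
  | p :: ps => f p :: ps

lemma split1_ne_nil (cs : List Char) : split1 cs ≠ [] := by
  cases cs with
  | nil => simp [split1]
  | cons c rest =>
    simp only [split1]
    split_ifs
    · simp
    · cases h : split1 rest <;> simp

lemma go_eq_split1 : ∀ (l : List Char) (fuel : Nat) (cur : List Char) (acc : List (List Char)),
    l.length < fuel →
    PySem.Chars.splitOn.go [':'] fuel l cur acc = acc.reverse ++ mapHead (cur.reverse ++ ·) (split1 l) := by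
  intro l
  induction l with
  | nil =>
    intro fuel cur acc hf
    obtain ⟨f, rfl⟩ : ∃ f, fuel = f + 1 := ⟨fuel - 1, by omega⟩
    simp [PySem.Chars.splitOn.go, split1, mapHead]
  | cons c rest ih =>
    intro fuel cur acc hf
    obtain ⟨f, rfl⟩ : ∃ f, fuel = f + 1 := ⟨fuel - 1, by omega⟩
    have hr : rest.length < f := by simpa using Nat.lt_of_succ_lt_succ hf
    by_cases hc : c = ':'
    · subst hc
      have hp : List.isPrefixOf [':'] (':' :: rest) = true := by simp [List.isPrefixOf]
      have step : PySem.Chars.splitOn.go [':'] (f + 1) (':' :: rest) cur acc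
          = PySem.Chars.splitOn.go [':'] f rest [] (cur.reverse :: acc) := by
        simp [PySem.Chars.splitOn.go, hp]
      rw [step, ih f [] (cur.reverse :: acc) hr]
      obtain ⟨p, ps, hps⟩ : ∃ p ps, split1 rest = p :: ps := by
        cases h : split1 rest with
        | nil => exact absurd h (split1_ne_nil rest)
        | cons p ps => exact ⟨p, ps, rfl⟩
      simp [split1, hps, mapHead]
    · have hp : List.isPrefixOf [':'] (c :: rest) = false := by
        simp [List.isPrefixOf]
        exact fun h => hc h.symm
      have step : PySem.Chars.splitOn.go [':'] (f + 1) (c :: rest) cur acc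
          = PySem.Chars.splitOn.go [':'] f rest (c :: cur) acc := by
        simp [PySem.Chars.splitOn.go, hp]
      rw [step, ih f (c :: cur) acc hr]
      obtain ⟨p, ps, hps⟩ : ∃ p ps, split1 rest = p :: ps := by
        cases h : split1 rest with
        | nil => exact absurd h (split1_ne_nil rest)
        | cons p ps => exact ⟨p, ps, rfl⟩
      simp [split1, hc, hps, mapHead]

lemma splitOn_colon (cs : List Char) : PySem.Chars.splitOn cs [':'] = split1 cs := by
  unfold PySem.Chars.splitOn
  rw [go_eq_split1 cs (cs.length + 1) [] [] (by omega)]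
  obtain ⟨p, ps, hps⟩ : ∃ p ps, split1 cs = p :: ps := by
    cases h : split1 cs with
    | nil => exact absurd h (split1_ne_nil cs)
    | cons p ps => exact ⟨p, ps, rfl⟩
  simp [hps, mapHead]

lemma str_split_colon (s : String) :
    (PySem.Str.split? s ":").getD [] = (split1 s.toList).map String.ofList := by
  have : PySem.Chars.split? s.toList [':'] = some (split1 s.toList) := by
    simp [PySem.Chars.split?, splitOn_colon]
  simp [PySem.Str.split?, show (":" : String).toList = [':'] from rfl, this]

-- the head of split1 has length = index of the first colon
lemma head_split1_len (cs : List Char) : ((split1 cs).headD []).length = firstColonIdx cs := by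
  induction cs with
  | nil => simp [split1, firstColonIdx]
  | cons c rest ih =>
    by_cases hc : c = ':'
    · simp [split1, firstColonIdx, hc]
    · obtain ⟨p, ps, hps⟩ : ∃ p ps, split1 rest = p :: ps := by
        cases h : split1 rest with
        | nil => exact absurd h (split1_ne_nil rest)
        | cons p ps => exact ⟨p, ps, rfl⟩
      rw [hps] at ih
      simp only [split1, firstColonIdx, hc, hps]
      simpa using ih

lemma join1_split1 (cs : List Char) : join1 (split1 cs) = cs := by
  induction cs with
  | nil => simp [split1, join1]
  | cons c rest ih =>
    obtain ⟨p, ps, hps⟩ : ∃ p ps, split1 rest = p :: ps := by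
      cases h : split1 rest with
      | nil => exact absurd h (split1_ne_nil rest)
      | cons p ps => exact ⟨p, ps, rfl⟩
    by_cases hc : c = ':'
    · subst hc
      rw [hps] at ih
      simp only [split1, hps]
      show join1 ([] :: p :: ps) = ':' :: rest
      simp only [join1, List.nil_append]
      exact congrArg (':' :: ·) ih
    · rw [hps] at ih
      simp only [split1, if_neg hc, hps]
      cases ps with
      | nil => simpa [join1] using congrArg (c :: ·) ih
      | cons q qs =>
        simp only [join1] at ih ⊢
        rw [← ih]
        simp

lemma split1_no_colon (cs : List Char) : ∀ p ∈ split1 cs, ':' ∉ p := by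
  induction cs with
  | nil => simp [split1]
  | cons c rest ih =>
    obtain ⟨p, ps, hps⟩ : ∃ p ps, split1 rest = p :: ps := by
      cases h : split1 rest with
      | nil => exact absurd h (split1_ne_nil rest)
      | cons p ps => exact ⟨p, ps, rfl⟩
    by_cases hc : c = ':'
    · simp only [split1, hc]
      intro q hq
      rcases List.mem_cons.mp hq with h | h
      · subst h; simp
      · exact ih q h
    · simp only [split1, if_neg hc, hps]
      intro q hq
      rcases List.mem_cons.mp hq with h | h
      · subst h
        intro hm
        rcases List.mem_cons.mp hm with h' | h'
        · exact hc h'.symm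
        · exact ih p (by simp [hps]) h'
      · exact ih q (by simp [hps, h])

lemma checkPos_append (k : Nat) (xs ys : List Char) :
    ∀ i, checkPos k i (xs ++ ys) = (checkPos k i xs && checkPos k (i + xs.length) ys) := by
  induction xs with
  | nil => intro i; simp [checkPos]
  | cons c rest ih =>
    intro i
    simp only [List.cons_append, checkPos, ih (i + 1), List.length_cons, Bool.and_assoc]
    ring_nf

lemma checkPos_free (k : Nat) (p : List Char) (hf : ∀ c ∈ p, c ≠ ':') :
    ∀ i, i % (k + 1) + p.length ≤ k → checkPos k i p = true := by
  induction p with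
  | nil => intro i _; simp [checkPos]
  | cons c rest ih =>
    intro i hi
    simp only [List.length_cons] at hi
    have hlt : i % (k + 1) < k := by omega
    have hc : (c == ':') = false := by
      simp only [beq_eq_false_iff_ne]
      exact hf c (by simp)
    have hm : (i % (k + 1) == k) = false := by
      simp only [beq_eq_false_iff_ne]; omega
    have hsucc : (i + 1) % (k + 1) = i % (k + 1) + 1 := by
      rw [Nat.add_mod]
      have h1 : 1 % (k + 1) = 1 := Nat.mod_eq_of_lt (by omega)
      rw [h1]
      exact Nat.mod_eq_of_lt (by omega)
    have hrec : checkPos k (i + 1) rest = true :=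
      ih (fun c hc => hf c (by simp [hc])) (i + 1) (by rw [hsucc]; omega)
    simp [checkPos, hc, hm, hrec]

lemma join1_len_mod (k : Nat) :
    ∀ (ps : List (List Char)), ps ≠ [] → (∀ p ∈ ps, p.length = k) →
    (join1 ps).length % (k + 1) = k := by
  intro ps
  induction ps with
  | nil => intro h; exact absurd rfl h
  | cons p rest ih =>
    intro _ hlen
    cases rest with
    | nil =>
      simp [join1, hlen p (by simp), Nat.mod_eq_of_lt (Nat.lt_succ_self k)]
    | cons q qs =>
      have hr := ih (by simp) (fun x hx => hlen x (by simp [List.mem_cons.mp hx]))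
      have hp : p.length = k := hlen p (by simp)
      simp only [join1, List.length_append, List.length_cons, hp]
      have : k + ((join1 (q :: qs)).length + 1) = (join1 (q :: qs)).length + (k + 1) := by omega
      rw [this, Nat.add_mod_right]
      exact hr

lemma checkPos_join1 (k : Nat) :
    ∀ (ps : List (List Char)), ps ≠ [] → (∀ p ∈ ps, p.length = k) →
    (∀ p ∈ ps, ':' ∉ p) →
    ∀ i, i % (k + 1) = 0 → checkPos k i (join1 ps) = true := by
  intro ps
  induction ps with
  | nil => intro h; exact absurd rfl h
  | cons p rest ih =>
    intro _ hlen hfree i hi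
    have hpk : p.length = k := hlen p (by simp)
    have hpf : ∀ c ∈ p, c ≠ ':' := fun c hc he => hfree p (by simp) (he ▸ hc)
    cases rest with
    | nil =>
      simp only [join1]
      exact checkPos_free k p hpf i (by omega)
    | cons q qs =>
      simp only [join1]
      rw [checkPos_append]
      have h1 : checkPos k i p = true := checkPos_free k p hpf i (by omega)
      have hik : (i + p.length) % (k + 1) = k := by
        rw [hpk, Nat.add_mod, hi, Nat.zero_add, Nat.mod_mod_of_dvd _ (dvd_refl _)]
        exact Nat.mod_eq_of_lt (by omega)
      have hnext : (i + p.length + 1) % (k + 1) = 0 := by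
        rw [hpk]
        have : i + k + 1 = i + (k + 1) := by omega
        rw [this, Nat.add_mod_right]
        exact hi
      have h2 : checkPos k (i + p.length) (':' :: join1 (q :: qs)) = true := by
        simp only [checkPos, hik, beq_self_eq_true, Bool.and_eq_true]
        exact ⟨trivial, ih (by simp) (fun x hx => hlen x (by simp [List.mem_cons.mp hx]))
          (fun x hx => hfree x (by simp [List.mem_cons.mp hx])) _ hnext⟩
      rw [h1, h2]
      rfl

lemma fci_no_colon (cs : List Char) (h : ':' ∉ cs) : firstColonIdx cs = cs.length := by
  induction cs with
  | nil => simp [firstColonIdx]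
  | cons c rest ih =>
    have hc : c ≠ ':' := fun he => h (by simp [he])
    have : ':' ∉ rest := fun hm => h (by simp [hm])
    simp [firstColonIdx, fun he => hc he, ih this]

lemma pyGetD_cons_zero {α : Type} (x : α) (xs : List α) (d : α) :
    PySem.List.pyGetD (x :: xs) 0 d = x := by
  simp [PySem.List.pyGetD, PySem.List.pyGet?, PySem.List.pyIdx?]

-- under Pre_, B returns the first-colon index, which equals the head part's length
lemma alt_eq_fci (s : String) (hpre : Pre_barcode_length s) :
    barcode_length_alt s = (firstColonIdx s.toList : Int) := by
  unfold barcode_length_alt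
  set cs := s.toList with hcs
  set k := firstColonIdx cs with hk
  obtain ⟨p, ps, hps⟩ : ∃ p ps, split1 cs = p :: ps := by
    cases h : split1 cs with
    | nil => exact absurd h (split1_ne_nil cs)
    | cons p ps => exact ⟨p, ps, rfl⟩
  have hpk : p.length = k := by
    have := head_split1_len cs
    rwa [hps, List.headD_cons] at this
  -- Pre_ in terms of split1
  unfold Pre_barcode_length at hpre
  rw [str_split_colon, ← hcs, hps] at hpre
  have hall : ∀ q ∈ p :: ps, q.length = k := by
    intro q hq
    have hmem : PySem.Str.len (String.ofList q) ∈
        ((p :: ps).map String.ofList).map (fun part => PySem.Str.len part) := by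
      simp only [List.map_map, List.mem_map, Function.comp]
      exact ⟨q, hq, rfl⟩
    have hhead : (((p :: ps).map String.ofList).map (fun part => PySem.Str.len part)).headD 0
        = (p.length : Int) := by
      simp [PySem.Str.len_eq]
    have := hpre _ hmem
    rw [hhead] at this
    have hq' : PySem.Str.len (String.ofList q) = (q.length : Int) := by
      simp [PySem.Str.len_eq]
    rw [hq'] at this
    have : q.length = p.length := by exact_mod_cast this
    omega
  have hfree := split1_no_colon cs
  rw [hps] at hfree
  have hjoin : join1 (p :: ps) = cs := by rw [← hps]; exact join1_split1 cs
  have hlenmod : cs.length % (k + 1) = k := by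
    rw [← hjoin]; exact join1_len_mod k (p :: ps) (by simp) hall
  have hcheck : checkPos k 0 cs = true := by
    rw [← hjoin]
    exact checkPos_join1 k (p :: ps) (by simp) hall hfree 0 (by simp)
  show (if (cs.length % (k + 1) == k && checkPos k 0 cs) = true then ((k : Nat) : Int) else 0)
      = ((k : Nat) : Int)
  simp [hlenmod, hcheck]

-- ===== VERDICT (by name: the statement is the Claim_ definition above) =====
theorem barcode_length_spec : Claim_equal_barcode_length := by
  intro s _ hpre
  unfold Spec_barcode_length
  rw [alt_eq_fci s hpre]
  unfold barcode_length
  by_cases hin : PySem.Str.isIn ":" s = true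
  · simp only [hin, if_true]
    rw [str_split_colon]
    obtain ⟨p, ps, hps⟩ : ∃ p ps, split1 s.toList = p :: ps := by
      cases h : split1 s.toList with
      | nil => exact absurd h (split1_ne_nil s.toList)
      | cons p ps => exact ⟨p, ps, rfl⟩
    unfold Pre_barcode_length at hpre
    rw [str_split_colon, hps] at hpre
    have hhead : (((p :: ps).map String.ofList).map (fun part => PySem.Str.len part)).headD 0
        = (p.length : Int) := by
      simp [PySem.Str.len_eq]
    rw [hps]
    have hlens : ((p :: ps).map String.ofList).map (fun part => PySem.Str.len part)
        = (p.length : Int) :: ps.map (fun q => (q.length : Int)) := by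
      simp [PySem.Str.len_eq, List.map_map, Function.comp]
    rw [hlens]
    have hget : PySem.List.pyGetD ((p.length : Int) :: ps.map (fun q => (q.length : Int))) 0 0
        = (p.length : Int) := pyGetD_cons_zero _ _ _
    have hallb : (PySem.List.slice ((p.length : Int) :: ps.map (fun q => (q.length : Int)))
        (some 1) none).all (fun to_check =>
          decide (PySem.List.pyGetD ((p.length : Int) :: ps.map (fun q => (q.length : Int))) 0 0
            = to_check)) = true := by
      rw [PySem.List.slice_from_one]
      simp only [List.tail_cons, List.all_eq_true, List.mem_map, decide_eq_true_eq, hget]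
      rintro x ⟨q, hq, rfl⟩
      have hmem : (q.length : Int) ∈
          (((p :: ps).map String.ofList).map (fun part => PySem.Str.len part)) := by
        rw [hlens]
        simp only [List.mem_cons, List.mem_map]
        exact Or.inr ⟨q, hq, rfl⟩
      have := hpre _ hmem
      rw [hhead] at this
      exact this.symm
    rw [if_pos hallb, hget]
    have := head_split1_len s.toList
    rw [hps, List.headD_cons] at this
    exact_mod_cast this
  · have hnin : ¬ ([':'] <:+: s.toList) := by
      intro hinf
      apply hin
      rw [PySem.Str.isIn_eq, show (":" : String).toList = [':'] from rfl,
        PySem.Chars.isIn_iff_infix]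
      exact hinf
    have hnc : ':' ∉ s.toList := by
      intro hm
      obtain ⟨a, b, hab⟩ := List.append_of_mem hm
      exact hnin ⟨a, b, by rw [hab]; simp⟩
    simp only [hin]
    rw [fci_no_colon s.toList hnc]
    simp [PySem.Str.len_eq]
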